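-- pv_equiv track=rewrite | github.com/ishine/pvx | src/pvx/cli/pvx.py | _strip_flags
-- ===== SOURCE A (Python) =====
-- def _token_flag(token: str) -> str:
--     return token.split("=", 1)[0]
--
-- def _strip_flags(args: list[str], flag_has_value: dict[str, bool]) -> list[str]:
--     out: list[str] = []
--     i = 0
--     while i < len(args):
--         token = str(args[i])
--         flag = _token_flag(token)
--         has_value = flag_has_value.get(flag)
--         if has_value is None:
--             out.append(token)
--             i += 1
--             continue
--         if "=" in token:
--             i += 1
--             continue
--         if has_value:
--             i += 2
--             continue
--         i += 1
--     return out
-- ===== SOURCE B (Python) =====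
-- def _strip_flags(args: list[str], flag_has_value: dict[str, bool]) -> list[str]:
--     # Suffix dynamic program, right to left: prev / prevprev are the results for the
--     # suffixes starting one / two positions further right, as shared cons cells.
--     prev = None       # result for args[i+1:]
--     prevprev = None   # result for args[i+2:]
--     for i in range(len(args) - 1, -1, -1):
--         token = str(args[i])
--         has_value = flag_has_value.get(token.split("=", 1)[0])
--         if has_value is None:
--             cur = (token, prev)
--         elif "=" in token:
--             cur = prev
--         elif has_value:
--             cur = prevprev
--         else:
--             cur = prev
--         prevprev, prev = prev, cur
--     out = []
--     while prev is not None: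
--         out.append(prev[0])
--         prev = prev[1]
--     return out
-- ===== Notes on version B (the rewrite author's own statement) =====
-- stated objective: alternative
-- what changed: Replaces A's forward index-jumping while loop with a right-to-left suffix dynamic program: each step computes the result for the current suffix from the shared, already-computed results of the next two suffixes (persistent cons cells), so no skip state or index arithmetic is needed.
import Mathlib
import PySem

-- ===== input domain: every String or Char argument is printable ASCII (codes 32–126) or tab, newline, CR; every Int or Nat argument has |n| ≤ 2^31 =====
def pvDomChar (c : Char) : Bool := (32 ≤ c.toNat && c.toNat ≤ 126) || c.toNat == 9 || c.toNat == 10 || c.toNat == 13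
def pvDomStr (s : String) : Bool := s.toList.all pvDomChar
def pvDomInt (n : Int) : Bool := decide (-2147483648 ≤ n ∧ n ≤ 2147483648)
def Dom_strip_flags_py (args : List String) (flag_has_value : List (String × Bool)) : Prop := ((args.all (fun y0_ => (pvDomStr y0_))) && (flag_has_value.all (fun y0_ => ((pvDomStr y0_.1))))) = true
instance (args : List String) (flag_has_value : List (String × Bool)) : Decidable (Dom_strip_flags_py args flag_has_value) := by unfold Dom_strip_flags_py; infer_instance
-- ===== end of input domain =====

-- B replaces A's forward index-jumping while loop by a right-to-left suffix dynamic
-- program carrying the results of the next two suffixes (objective: alternative).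

-- ===== PORT A =====
-- _token_flag: token.split("=", 1)[0]. Python's [0] would raise on an empty list, but
-- str.split always returns a non-empty list, so List.getD 0 "" is exact here.
def pvTokenFlag (token : String) : String :=
  ((PySem.Str.splitMax? token "=" 1).getD []).getD 0 ""

-- A's while loop over index i, rendered as recursion on the not-yet-visited suffix;
-- 'i += 2' skips the next token (if there is none, the loop condition ends the loop).
def stripA_go (fhv : PySem.Dict String Bool) : List String → List String
  | [] => []
  | token :: rest =>
    match PySem.Dict.get? fhv (pvTokenFlag token) with
    | none => token :: stripA_go fhv rest
    | some hv =>
      if PySem.Str.isIn "=" token then stripA_go fhv rest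
      else if hv then
        match rest with
        | [] => []
        | _ :: rs => stripA_go fhv rs
      else stripA_go fhv rest

def strip_flags_py (args : List String) (flag_has_value : List (String × Bool)) : List String :=
  stripA_go (PySem.Dict.mk flag_has_value) args

-- ===== PORT B =====
-- one right-to-left step: st = (prev, prevprev), the results for the next two suffixes
def stripB_step (fhv : PySem.Dict String Bool) (token : String) (st : List String × List String) :
    List String × List String :=
  let cur :=
    match PySem.Dict.get? fhv (((PySem.Str.splitMax? token "=" 1).getD []).getD 0 "") with
    | none => token :: st.1
    | some hv => if PySem.Str.isIn "=" token then st.1 else if hv then st.2 else st.1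
  (cur, st.1)

def strip_flags_py_alt (args : List String) (flag_has_value : List (String × Bool)) : List String :=
  (args.foldr (stripB_step (PySem.Dict.mk flag_has_value)) ([], [])).1

-- ===== PRECONDITION & SPEC =====
def Spec_strip_flags_py (args : List String) (flag_has_value : List (String × Bool)) (out : List String) : Prop := out = strip_flags_py_alt args flag_has_value
instance (args : List String) (flag_has_value : List (String × Bool)) (out : List String) : Decidable (Spec_strip_flags_py args flag_has_value out) := by unfold Spec_strip_flags_py; infer_instance

-- ===== CLAIM (what is proved, stated in full; the proofs are below) =====
def Claim_equal_strip_flags_py : Prop := ∀ (args : List String) (flag_has_value : List (String × Bool)), Dom_strip_flags_py args flag_has_value → Spec_strip_flags_py args flag_has_value (strip_flags_py args flag_has_value)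

-- ===== LEMMAS AND PROOFS =====
-- One cons-step equation for A's loop, with the hv=true sub-match rewritten
-- uniformly as the tail of the rest (both cases of rest agree).
lemma A_cons (fhv : PySem.Dict String Bool) (token : String) (rest : List String) :
    stripA_go fhv (token :: rest) =
      match PySem.Dict.get? fhv (pvTokenFlag token) with
      | none => token :: stripA_go fhv rest
      | some hv =>
        if PySem.Str.isIn "=" token then stripA_go fhv rest
        else if hv then stripA_go fhv rest.tail
        else stripA_go fhv rest := by
  rw [stripA_go.eq_def]
  cases hg : PySem.Dict.get? fhv (pvTokenFlag token) with
  | none => simp [hg]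
  | some hv =>
    simp only [hg]
    cases rest <;> cases hv <;> simp [stripA_go]

-- Invariant of B's right fold: the carried pair is exactly
-- (A's result on the suffix, A's result on the suffix's tail).
lemma stripB_fold_eq (fhv : PySem.Dict String Bool) (l : List String) :
    l.foldr (stripB_step fhv) ([], []) = (stripA_go fhv l, stripA_go fhv l.tail) := by
  induction l with
  | nil => simp [stripA_go]
  | cons token rest ih =>
    simp only [List.foldr_cons, ih, List.tail_cons]
    rw [A_cons]
    cases hg : PySem.Dict.get? fhv (pvTokenFlag token) with
    | none =>
      simp only [pvTokenFlag, List.getD_eq_getElem?_getD] at hg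
      simp [stripB_step, hg]
    | some hv =>
      simp only [pvTokenFlag, List.getD_eq_getElem?_getD] at hg
      cases hi : PySem.Chars.isIn ['='] token.toList <;> cases hv <;>
        simp [stripB_step, PySem.Str.isIn, hg, hi]

-- ===== VERDICT (by name: the statement is the Claim_ definition above) =====
theorem strip_flags_py_spec : Claim_equal_strip_flags_py := by
  intro args fhv _
  unfold Spec_strip_flags_py strip_flags_py strip_flags_py_alt
  rw [stripB_fold_eq]
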